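-- pv_equiv track=rewrite | github.com/clivegross/ffpreader | ffpreader.py | separate_sections
-- ===== SOURCE A (Python) =====
-- def separate_sections(text):
--     sections = []
--     start = 0
--     while True:
--         start = text.find('[', start)
--         if start == -1:
--             break
--         end = text.find(']', start)
--         if end == -1:
--             break
--         # trim leading and trailing white space
--         trimmed = text[start+1:end].strip()
--         sections.append(trimmed)
--         start = end + 1
--     return sections
-- ===== SOURCE B (Python) =====
-- def separate_sections(text):
--     # One-pass state machine: outside brackets / inside collecting chars.
--     sections = []
--     buf = None  # None = outside a section; list of chars = inside one
--     for ch in text: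
--         if buf is None:
--             if ch == '[':
--                 buf = []
--         elif ch == ']':
--             sections.append(''.join(buf).strip())
--             buf = None
--         else:
--             buf.append(ch)
--     return sections
-- ===== Notes on version B (the rewrite author's own statement) =====
-- stated objective: alternative
-- what changed: Replaced the repeated str.find calls and index bookkeeping with a single character-by-character pass driven by a two-state machine (outside/inside brackets) that accumulates section contents.
import Mathlib
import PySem

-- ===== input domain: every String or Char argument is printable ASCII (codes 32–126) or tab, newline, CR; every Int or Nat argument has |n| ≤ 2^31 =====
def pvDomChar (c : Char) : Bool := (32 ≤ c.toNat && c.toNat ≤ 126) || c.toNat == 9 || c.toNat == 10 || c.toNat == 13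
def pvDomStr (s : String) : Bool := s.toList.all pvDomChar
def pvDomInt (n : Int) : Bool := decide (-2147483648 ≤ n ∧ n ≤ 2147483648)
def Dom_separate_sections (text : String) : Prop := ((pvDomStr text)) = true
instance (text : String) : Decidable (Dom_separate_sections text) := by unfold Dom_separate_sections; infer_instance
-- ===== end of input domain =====

-- B replaces A's repeated find calls with a single two-state pass over the characters (objective: alternative).

-- ===== PORT A =====
-- A's 'while True' find-loop; fuel = length + 1 always suffices (start strictly increases).
def sepAuxA (cs : List Char) (fuel : Nat) (start : Int) : List String :=
  match fuel with
  | 0 => []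
  | fuel + 1 =>
    let s1 := PySem.Chars.findFrom cs ['['] start none
    if s1 = -1 then []
    else
      let e := PySem.Chars.findFrom cs [']'] s1 none
      if e = -1 then []
      else
        String.ofList (PySem.Chars.strip (PySem.Chars.slice cs (some (s1 + 1)) (some e)))
          :: sepAuxA cs fuel (e + 1)

def separate_sections (text : String) : List String :=
  sepAuxA text.toList (text.toList.length + 1) 0

-- ===== PORT B =====
-- one step of B's for-loop: state = (sections so far, optional open-section buffer)
def stepB (st : List String × Option (List Char)) (ch : Char) : List String × Option (List Char) :=
  match st.2 with
  | none => if ch = '[' then (st.1, some []) else st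
  | some buf =>
    if ch = ']' then (st.1 ++ [String.ofList (PySem.Chars.strip buf)], none)
    else (st.1, some (buf ++ [ch]))

def separate_sections_alt (text : String) : List String :=
  (text.toList.foldl stepB ([], none)).1

-- ===== PRECONDITION & SPEC =====
def Spec_separate_sections (text : String) (out : List String) : Prop := out = separate_sections_alt text
instance (text : String) (out : List String) : Decidable (Spec_separate_sections text out) := by unfold Spec_separate_sections; infer_instance

-- ===== CLAIM (what is proved, stated in full; the proofs are below) =====
def Claim_equal_separate_sections : Prop := ∀ (text : String), Dom_separate_sections text → Spec_separate_sections text (separate_sections text)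

-- ===== LEMMAS AND PROOFS =====

-- proof-side helpers: the state machine as direct mutual recursion on the char list
mutual
def dfaOut : List Char → List String
  | [] => []
  | c :: t => if c = '[' then dfaIn t [] else dfaOut t
def dfaIn : List Char → List Char → List String
  | [], _ => []
  | c :: t, buf => if c = ']' then String.ofList (PySem.Chars.strip buf) :: dfaOut t else dfaIn t (buf ++ [c])
end

theorem find_eq_of (s : List Char) (sub : List Char) (n : Nat)
    (h1 : sub <+: s.drop n) (h2 : ∀ i < n, ¬ sub <+: s.drop i) :
    PySem.Chars.find s sub = (n : Int) := by
  have hinf : sub <:+: s := (h1.isInfix).trans (s.drop_suffix n).isInfix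
  have hpos : 0 ≤ PySem.Chars.find s sub := (PySem.Chars.find_nonneg_iff s sub).2 hinf
  have hspec := PySem.Chars.find_spec (s := s) (sub := sub) hpos
  rcases lt_trichotomy (PySem.Chars.find s sub).toNat n with h | h | h
  · exact absurd hspec.1 (h2 _ h)
  · omega
  · exact absurd h1 (hspec.2 n h)

theorem find_singleton_nil (x : Char) : PySem.Chars.find ([] : List Char) [x] = -1 := by
  rw [PySem.Chars.find_eq_neg_one_iff]
  simp

theorem find_singleton_cons (c x : Char) (t : List Char) :
    PySem.Chars.find (c :: t) [x] =
      if c = x then 0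
      else if PySem.Chars.find t [x] = -1 then -1 else PySem.Chars.find t [x] + 1 := by
  split_ifs with hc hn
  · subst hc
    exact find_eq_of _ _ 0 (by simp) (by omega)
  · rw [PySem.Chars.find_eq_neg_one_iff] at hn ⊢
    simp only [List.singleton_infix_iff] at hn ⊢
    simp only [List.mem_cons, not_or] at *
    exact ⟨fun h => hc h.symm, hn⟩
  · have hpos : 0 ≤ PySem.Chars.find t [x] := by
      have := PySem.Chars.neg_one_le_find (s := t) (sub := [x])
      omega
    have hspec := PySem.Chars.find_spec (s := t) (sub := [x]) hpos
    have : PySem.Chars.find (c :: t) [x] = ((PySem.Chars.find t [x]).toNat + 1 : Nat) := by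
      apply find_eq_of
      · simpa using hspec.1
      · intro i hi
        match i with
        | 0 => simp only [List.drop_zero, List.cons_prefix_cons]
               exact fun h => hc h.1.symm
        | i + 1 => simpa using hspec.2 i (by omega)
    omega

theorem dfaIn_eq (t : List Char) (buf : List Char) :
    dfaIn t buf =
      if PySem.Chars.find t [']'] = -1 then []
      else
        String.ofList (PySem.Chars.strip (buf ++ t.take (PySem.Chars.find t [']']).toNat))
          :: dfaOut (t.drop ((PySem.Chars.find t [']']).toNat + 1)) := by
  induction t generalizing buf with
  | nil => simp [dfaIn, find_singleton_nil]
  | cons c t ih =>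
    rw [dfaIn, find_singleton_cons]
    by_cases hc : c = ']'
    · simp [hc]
    · have hneg : -1 ≤ PySem.Chars.find t [']'] := PySem.Chars.neg_one_le_find t [']']
      by_cases hn : PySem.Chars.find t [']'] = -1
      · simp [hc, hn, ih]
      · have h0 : 0 ≤ PySem.Chars.find t [']'] := by omega
        rw [ih]
        simp only [if_neg hc, if_neg hn]
        rw [if_neg (show ¬ PySem.Chars.find t [']'] + 1 = -1 by omega)]
        have htn : (PySem.Chars.find t [']'] + 1).toNat = (PySem.Chars.find t [']']).toNat + 1 := by omega
        simp [htn, List.append_assoc]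

theorem dfaOut_eq (d : List Char) :
    dfaOut d =
      if PySem.Chars.find d ['['] = -1 then []
      else dfaIn (d.drop ((PySem.Chars.find d ['[']).toNat + 1)) [] := by
  induction d with
  | nil => simp [dfaOut, find_singleton_nil]
  | cons c t ih =>
    rw [dfaOut, find_singleton_cons]
    by_cases hc : c = '['
    · simp [hc]
    · have hneg : -1 ≤ PySem.Chars.find t ['['] := PySem.Chars.neg_one_le_find t ['[']
      by_cases hn : PySem.Chars.find t ['['] = -1
      · simp [hc, hn, ih]
      · rw [ih]
        simp only [if_neg hc, if_neg hn]
        rw [if_neg (show ¬ PySem.Chars.find t ['['] + 1 = -1 by omega)]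
        have htn : (PySem.Chars.find t ['['] + 1).toNat = (PySem.Chars.find t ['[']).toNat + 1 := by omega
        simp [htn]

theorem foldB_both (d : List Char) :
    (∀ acc : List String, (List.foldl stepB (acc, none) d).1 = acc ++ dfaOut d) ∧
    (∀ (acc : List String) (buf : List Char), (List.foldl stepB (acc, some buf) d).1 = acc ++ dfaIn d buf) := by
  induction d with
  | nil => simp [dfaOut, dfaIn]
  | cons c t ih =>
    constructor
    · intro acc
      by_cases hc : c = '['
      · simp [List.foldl_cons, stepB, hc, dfaOut, ih.2]
      · simp [List.foldl_cons, stepB, hc, dfaOut, ih.1]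
    · intro acc buf
      by_cases hc : c = ']'
      · simp [List.foldl_cons, stepB, hc, dfaIn, ih.1]
      · simp [List.foldl_cons, stepB, hc, dfaIn, ih.2]

theorem auxA_eq (cs : List Char) (fuel : Nat) (k : Nat)
    (hk : k ≤ cs.length) (hf : cs.length - k < fuel) :
    sepAuxA cs fuel (k : Int) = dfaOut (cs.drop k) := by
  induction fuel generalizing k with
  | zero => omega
  | succ fuel ih =>
    rw [sepAuxA]
    simp only
    rw [PySem.Chars.findFrom_natCast cs ['['] k hk]
    set d := cs.drop k with hd
    by_cases h1 : PySem.Chars.find d ['['] = -1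
    · simp [h1, dfaOut_eq]
    · have h1pos : 0 ≤ PySem.Chars.find d ['['] := by
        have := PySem.Chars.neg_one_le_find d ['[']; omega
      set i : Nat := (PySem.Chars.find d ['[']).toNat with hi
      have hfind1 : PySem.Chars.find d ['['] = (i : Int) := by omega
      have hspec1 := PySem.Chars.find_spec (s := d) (sub := ['[']) h1pos
      obtain ⟨t1, ht1⟩ := hspec1.1
      rw [← hi] at ht1
      have hlen1 : i < d.length := by
        have := congrArg List.length ht1
        simp [List.length_drop] at this
        omega
      have hdlen : d.length = cs.length - k := by simp [hd]
      have hki : k + i ≤ cs.length := by omega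
      rw [if_neg h1, hfind1]
      have hcast : (k : Int) + (i : Int) = ((k + i : Nat) : Int) := by push_cast; ring
      rw [hcast, PySem.Chars.findFrom_natCast cs [']'] (k + i) (by omega)]
      have hdrop : cs.drop (k + i) = d.drop i := by
        rw [hd, List.drop_drop]
      have hdi : d.drop i = '[' :: t1 := by simpa using ht1.symm
      rw [hdrop, hdi, find_singleton_cons]
      simp only [if_neg (by decide : ¬ ('[' : Char) = ']')]
      by_cases h2 : PySem.Chars.find t1 [']'] = -1
      · have hne1 : ¬ (((k + i : Nat) : Int) = -1) := by omega
        rw [dfaOut_eq, if_neg h1, hfind1]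
        simp only [Int.toNat_natCast]
        have ht1d : d.drop (i + 1) = t1 := by
          have : (d.drop i).drop 1 = t1 := by rw [hdi]; simp
          rwa [List.drop_drop] at this
        rw [ht1d, dfaIn_eq, if_pos h2]
        simp [h2]
      · have h2pos : 0 ≤ PySem.Chars.find t1 [']'] := by
          have := PySem.Chars.neg_one_le_find t1 [']']; omega
        set j : Nat := (PySem.Chars.find t1 [']']).toNat with hj
        have hfind2 : PySem.Chars.find t1 [']'] = (j : Int) := by omega
        have hspec2 := PySem.Chars.find_spec (s := t1) (sub := [']']) h2pos
        obtain ⟨t2, ht2⟩ := hspec2.1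
        rw [← hj] at ht2
        have hlen2 : j < t1.length := by
          have := congrArg List.length ht2
          simp [List.length_drop] at this
          omega
        have ht1len : t1.length = d.length - i - 1 := by
          have := congrArg List.length hdi
          simp [List.length_drop] at this
          omega
        have hne1 : ¬ (((k + i : Nat) : Int) = -1) := by omega
        have hnej : ¬ ((j : Int) = -1) := by omega
        have hnej1 : ¬ ((j : Int) + 1 = -1) := by omega
        have hnee : ¬ (((k + i : Nat) : Int) + ((j:Int) + 1) = -1) := by omega
        rw [hfind2]
        simp only [if_neg hne1, if_neg hnej, if_neg hnej1, if_neg hnee]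
        -- the slice
        have hslice : PySem.Chars.slice cs (some (((k + i : Nat) : Int) + 1)) (some (((k + i : Nat) : Int) + ((j:Int) + 1)))
            = t1.take j := by
          have hc1 : ((k + i : Nat) : Int) + 1 = ((k + i + 1 : Nat) : Int) := by push_cast; ring
          have hc2 : ((k + i : Nat) : Int) + ((j:Int) + 1) = ((k + i + 1 + j : Nat) : Int) := by push_cast; ring
          rw [hc1, hc2]
          simp only [PySem.Chars.slice_eq_listSlice]
          rw [PySem.List.slice_natCast]
          have : cs.drop (k + i + 1) = t1 := by
            have : (cs.drop (k + i)).drop 1 = t1 := by rw [hdrop, hdi]; simp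
            rwa [List.drop_drop] at this
          rw [this]
          congr 1
          omega
        rw [hslice]
        -- the recursive call
        have hrec : (((k + i : Nat) : Int) + ((j:Int) + 1)) + 1 = ((k + i + j + 2 : Nat) : Int) := by push_cast; ring
        rw [hrec, ih (k + i + j + 2) (by omega) (by omega)]
        -- RHS
        have ht1d : d.drop (i + 1) = t1 := by
          have : (d.drop i).drop 1 = t1 := by rw [hdi]; simp
          rwa [List.drop_drop] at this
        have hR : dfaOut d = String.ofList (PySem.Chars.strip (t1.take j)) :: dfaOut (t1.drop (j + 1)) := by
          rw [dfaOut_eq, if_neg h1, hfind1]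
          simp only [Int.toNat_natCast]
          rw [ht1d, dfaIn_eq, if_neg h2, hfind2]
          simp only [Int.toNat_natCast, List.nil_append]
        rw [hR]
        congr 2
        rw [← ht1d, hd, List.drop_drop, List.drop_drop]
        congr 1
        omega


-- ===== VERDICT (by name: the statement is the Claim_ definition above) =====
theorem separate_sections_spec : Claim_equal_separate_sections := by
  intro text _
  unfold Spec_separate_sections separate_sections separate_sections_alt
  have h := auxA_eq text.toList (text.toList.length + 1) 0 (by omega) (by omega)
  simpa [(foldB_both text.toList).1 []] using h
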